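-- pv_equiv track=rewrite | github.com/pappydee/MailJaeger | src/services/ai_service.py | _is_spam_heuristic
-- ===== SOURCE A (Python) =====
-- def _is_spam_heuristic(subject: str, body: str, sender: str) -> bool:
--     """Simple spam detection heuristics"""
--     spam_indicators = [
--         "unsubscribe",
--         "abmelden",
--         "newsletter",
--         "click here",
--         "klicken sie hier",
--         "congratulations",
--         "gewonnen",
--         "free",
--         "kostenlos",
--         "gratis",
--     ]
--
--     content = f"{subject} {body} {sender}"
--     return any(indicator in content for indicator in spam_indicators)
-- ===== SOURCE B (Python) =====
-- import re
--
-- _SPAM_PATTERN = re.compile("|".join(re.escape(ind) for ind in [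
--     "unsubscribe",
--     "abmelden",
--     "newsletter",
--     "click here",
--     "klicken sie hier",
--     "congratulations",
--     "gewonnen",
--     "free",
--     "kostenlos",
--     "gratis",
-- ]))
--
--
-- def _is_spam_heuristic(subject: str, body: str, sender: str) -> bool:
--     """Simple spam detection heuristics"""
--     content = f"{subject} {body} {sender}"
--     return bool(_SPAM_PATTERN.search(content))
-- ===== Notes on version B (the rewrite author's own statement) =====
-- stated objective: idiomatic
-- what changed: Replaces the ten separate 'indicator in content' substring scans with one precompiled regex alternation searched in a single pass over the content string.
import Mathlib
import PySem

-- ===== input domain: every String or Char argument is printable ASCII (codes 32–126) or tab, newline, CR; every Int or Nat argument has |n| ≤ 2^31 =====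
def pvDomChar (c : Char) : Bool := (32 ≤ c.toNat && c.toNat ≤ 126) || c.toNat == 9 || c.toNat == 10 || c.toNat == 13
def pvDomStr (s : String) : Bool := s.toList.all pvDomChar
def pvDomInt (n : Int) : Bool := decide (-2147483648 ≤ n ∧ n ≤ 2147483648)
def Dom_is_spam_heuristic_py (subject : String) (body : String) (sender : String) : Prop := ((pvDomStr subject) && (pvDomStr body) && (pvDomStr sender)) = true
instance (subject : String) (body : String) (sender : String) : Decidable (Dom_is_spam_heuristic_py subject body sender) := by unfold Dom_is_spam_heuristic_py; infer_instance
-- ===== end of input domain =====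

-- B replaces ten separate substring scans by one single left-to-right search that tries
-- every indicator at each position (a regex alternation in the Python); same result, idiomatic.

-- ===== PORT A =====
def pvSpamIndicators : List String :=
  ["unsubscribe", "abmelden", "newsletter", "click here", "klicken sie hier",
   "congratulations", "gewonnen", "free", "kostenlos", "gratis"]

def is_spam_heuristic_py (subject : String) (body : String) (sender : String) : Bool :=
  let content := subject ++ " " ++ body ++ " " ++ sender
  pvSpamIndicators.any (fun indicator => PySem.Str.isIn indicator content)

-- ===== PORT B =====
-- the alternation search: at each start position try every alternative, else advance one char
def pvAltSearch (pats : List (List Char)) : List Char → Bool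
  | [] => pats.any (fun p => p.isPrefixOf ([] : List Char))
  | c :: cs => pats.any (fun p => p.isPrefixOf (c :: cs)) || pvAltSearch pats cs

def is_spam_heuristic_py_alt (subject : String) (body : String) (sender : String) : Bool :=
  let content := subject ++ " " ++ body ++ " " ++ sender
  pvAltSearch (pvSpamIndicators.map String.toList) content.toList

-- ===== PRECONDITION & SPEC =====
def Spec_is_spam_heuristic_py (subject : String) (body : String) (sender : String) (out : Bool) : Prop := out = is_spam_heuristic_py_alt subject body sender
instance (subject : String) (body : String) (sender : String) (out : Bool) : Decidable (Spec_is_spam_heuristic_py subject body sender out) := by unfold Spec_is_spam_heuristic_py; infer_instance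

-- ===== CLAIM (what is proved, stated in full; the proofs are below) =====
def Claim_equal_is_spam_heuristic_py : Prop := ∀ (subject : String) (body : String) (sender : String), Dom_is_spam_heuristic_py subject body sender → Spec_is_spam_heuristic_py subject body sender (is_spam_heuristic_py subject body sender)

-- ===== LEMMAS AND PROOFS =====

theorem pvAltSearch_iff (pats : List (List Char)) (cs : List Char) :
    pvAltSearch pats cs = true ↔ ∃ p ∈ pats, p <:+: cs := by
  induction cs with
  | nil =>
    simp [pvAltSearch, List.any_eq_true, List.isPrefixOf_iff_prefix]
  | cons c cs ih =>
    simp only [pvAltSearch, Bool.or_eq_true, List.any_eq_true,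
      List.isPrefixOf_iff_prefix, ih]
    constructor
    · rintro (⟨p, hp, h⟩ | ⟨p, hp, h⟩)
      · exact ⟨p, hp, h.isInfix⟩
      · exact ⟨p, hp, h.trans ((List.suffix_cons c cs).isInfix)⟩
    · rintro ⟨p, hp, h⟩
      rcases (List.infix_cons_iff).1 h with h' | h'
      · exact Or.inl ⟨p, hp, h'⟩
      · exact Or.inr ⟨p, hp, h'⟩

-- ===== VERDICT (by name: the statement is the Claim_ definition above) =====
theorem is_spam_heuristic_py_spec : Claim_equal_is_spam_heuristic_py := by
  intro subject body sender _
  unfold Spec_is_spam_heuristic_py is_spam_heuristic_py is_spam_heuristic_py_alt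
  rw [Bool.eq_iff_iff]
  simp only [List.any_eq_true, PySem.Str.isIn_iff_infix, pvAltSearch_iff, List.mem_map]
  constructor
  · rintro ⟨ind, hind, h⟩
    exact ⟨ind.toList, ⟨ind, hind, rfl⟩, h⟩
  · rintro ⟨p, ⟨ind, hind, rfl⟩, h⟩
    exact ⟨ind, hind, h⟩
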